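-- pv_equiv track=rewrite | github.com/Zeber0/lab2veb | lab2veb.py | Del
-- ===== SOURCE A (Python) =====
-- def Del(l):
--     a = []
--     b = []
--     c = []
--     for i in l:
--         if i % 2 == 0:
--             a.append(i)
--         if i % 3 == 0:
--             b.append(i)
--         if i % 5 == 0:
--             c.append(i)
--     return a, b, c
-- ===== SOURCE B (Python) =====
-- def Del(l):
--     a = [i for i in l if i % 2 == 0]
--     b = [i for i in l if i % 3 == 0]
--     c = [i for i in l if i % 5 == 0]
--     return a, b, c
-- ===== Notes on version B (the rewrite author's own statement) =====
-- stated objective: idiomatic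
-- what changed: Replaces the single fused loop with three conditional appends per element by three independent list comprehensions, one filtering pass per divisor.
import Mathlib
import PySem

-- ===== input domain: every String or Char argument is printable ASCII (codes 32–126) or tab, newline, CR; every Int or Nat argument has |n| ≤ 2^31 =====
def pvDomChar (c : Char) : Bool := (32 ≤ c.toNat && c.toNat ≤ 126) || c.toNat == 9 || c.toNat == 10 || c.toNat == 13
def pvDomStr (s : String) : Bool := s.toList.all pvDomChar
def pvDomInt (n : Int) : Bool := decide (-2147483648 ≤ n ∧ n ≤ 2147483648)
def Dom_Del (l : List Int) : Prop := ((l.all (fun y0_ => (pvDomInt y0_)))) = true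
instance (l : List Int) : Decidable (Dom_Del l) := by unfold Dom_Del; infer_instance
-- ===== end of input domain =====

-- B replaces A's single fused loop by three independent filtering passes (idiomatic decomposition, same cost).

-- ===== PORT A =====
-- A: one fused pass over l; the three lists grow by conditional appends, as in the Python loop
def DelStep (s : List Int × List Int × List Int) (i : Int) : List Int × List Int × List Int :=
  let s := if PySem.Int.mod i 2 = 0 then (s.1 ++ [i], s.2.1, s.2.2) else s
  let s := if PySem.Int.mod i 3 = 0 then (s.1, s.2.1 ++ [i], s.2.2) else s
  if PySem.Int.mod i 5 = 0 then (s.1, s.2.1, s.2.2 ++ [i]) else s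

def Del (l : List Int) : List Int × List Int × List Int :=
  l.foldl DelStep ([], [], [])

-- ===== PORT B =====
-- B: three independent filtering passes, one per divisor
def Del_alt (l : List Int) : List Int × List Int × List Int :=
  (l.filter (fun i => PySem.Int.mod i 2 = 0),
   l.filter (fun i => PySem.Int.mod i 3 = 0),
   l.filter (fun i => PySem.Int.mod i 5 = 0))

-- ===== PRECONDITION & SPEC =====
def Spec_Del (l : List Int) (out : List Int × List Int × List Int) : Prop := out = Del_alt l
instance (l : List Int) (out : List Int × List Int × List Int) : Decidable (Spec_Del l out) := by unfold Spec_Del; infer_instance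

-- ===== CLAIM (what is proved, stated in full; the proofs are below) =====
def Claim_equal_Del : Prop := ∀ (l : List Int), Dom_Del l → Spec_Del l (Del l)

-- ===== LEMMAS AND PROOFS =====
-- Loop invariant: A's fold from state (a,b,c) appends each divisor's filter of the rest.
theorem Del_foldl (l a b c : List Int) :
    l.foldl DelStep (a, b, c)
    = (a ++ l.filter (fun i => decide (PySem.Int.mod i 2 = 0)),
       b ++ l.filter (fun i => decide (PySem.Int.mod i 3 = 0)),
       c ++ l.filter (fun i => decide (PySem.Int.mod i 5 = 0))) := by
  induction l generalizing a b c with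
  | nil => simp
  | cons x xs ih =>
    simp only [List.foldl_cons, List.filter_cons, DelStep]
    by_cases h2 : PySem.Int.mod x 2 = 0 <;>
      by_cases h3 : PySem.Int.mod x 3 = 0 <;>
        by_cases h5 : PySem.Int.mod x 5 = 0 <;>
          simp only [h2, h3, h5, if_false, decide_true, decide_false, if_pos] <;>
          rw [ih] <;> simp

-- ===== VERDICT (by name: the statement is the Claim_ definition above) =====
theorem Del_spec : Claim_equal_Del := by
  intro l _
  unfold Spec_Del Del Del_alt
  exact Del_foldl l [] [] []
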